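-- pv_equiv track=rewrite | github.com/hwpang/ARC | arc/common.py | extermum_list
-- ===== SOURCE A (Python) =====
-- from typing import Any, List, Optional, Tuple, Union
--
-- def extermum_list(lst: list,
--                   return_min: bool = True,
--                   ) -> Union[int, None]:
--     """
--     A helper function for finding the minimum of a list of numbers (int/float) where some of the entries might be None.
--
--     Args:
--         lst (list): The list.
--         return_min (bool, optional): Whether to return the minimum or the maximum.
--                                     ``True`` for minimum, ``False`` for maximum, ``True`` by default.
--
--     Returns: int
--         The entry with the minimal value.
--     """
--     if len(lst) == 0:
--         return None
--     elif len(lst) == 1: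
--         return lst[0]
--     elif all([entry is None for entry in lst]):
--         return None
--     if return_min:
--         return min([entry for entry in lst if entry is not None])
--     else:
--         return max([entry for entry in lst if entry is not None])
-- ===== SOURCE B (Python) =====
-- def extermum_list(lst: list,
--                   return_min: bool = True,
--                   ) -> "Union[int, None]":
--     """Single-pass extremum over a list with possible None entries."""
--     best = None
--     for entry in lst:
--         if entry is None:
--             continue
--         if best is None or (entry < best if return_min else entry > best):
--             best = entry
--     return best
-- ===== Notes on version B (the rewrite author's own statement) =====
-- stated objective: simpler
-- what changed: Replaced A's four separate passes (len checks, all-None scan, filtering comprehension, library min/max) by one fold that tracks the running best while skipping None entries.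
import Mathlib
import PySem

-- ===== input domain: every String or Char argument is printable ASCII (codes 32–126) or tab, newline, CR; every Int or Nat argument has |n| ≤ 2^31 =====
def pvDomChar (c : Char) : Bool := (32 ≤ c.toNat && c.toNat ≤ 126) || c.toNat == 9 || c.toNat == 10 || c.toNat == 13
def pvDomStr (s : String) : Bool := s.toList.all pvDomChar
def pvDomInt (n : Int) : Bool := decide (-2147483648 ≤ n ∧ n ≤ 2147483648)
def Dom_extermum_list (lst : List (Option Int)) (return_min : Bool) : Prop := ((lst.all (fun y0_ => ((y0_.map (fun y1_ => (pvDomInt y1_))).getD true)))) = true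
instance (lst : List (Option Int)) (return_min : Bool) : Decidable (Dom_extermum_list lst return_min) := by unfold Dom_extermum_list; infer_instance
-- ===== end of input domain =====

-- B replaces A's multiple passes (length guards, all-None scan, filter, min/max) by one
-- best-tracking fold; same return value on every input.
-- ===== PORT A =====
-- Port of A: length guards, all-None scan, then min/max of the filtered values.
def extermum_list (lst : List (Option Int)) (return_min : Bool) : Option Int :=
  if lst.length = 0 then none
  else if lst.length = 1 then (PySem.List.pyGet? lst 0).getD none
  else if lst.all (fun entry => entry.isNone) then none
  else
    let vals := lst.filterMap id
    if return_min then PySem.List.min? vals (fun x => x)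
    else PySem.List.max? vals (fun x => x)

-- ===== PORT B =====
-- Port of B: one fold tracking the running best, skipping None entries.
def extermum_list_alt (lst : List (Option Int)) (return_min : Bool) : Option Int :=
  lst.foldl (fun best entry =>
    match entry with
    | none => best
    | some v =>
      match best with
      | none => some v
      | some b => if (if return_min then v < b else b < v) then some v else some b) none

-- ===== PRECONDITION & SPEC =====
def Spec_extermum_list (lst : List (Option Int)) (return_min : Bool) (out : Option Int) : Prop := out = extermum_list_alt lst return_min
instance (lst : List (Option Int)) (return_min : Bool) (out : Option Int) : Decidable (Spec_extermum_list lst return_min out) := by unfold Spec_extermum_list; infer_instance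

-- ===== CLAIM (what is proved, stated in full; the proofs are below) =====
def Claim_equal_extermum_list : Prop := ∀ (lst : List (Option Int)) (return_min : Bool), Dom_extermum_list lst return_min → Spec_extermum_list lst return_min (extermum_list lst return_min)

-- ===== LEMMAS AND PROOFS =====

def pvStep (return_min : Bool) : Option Int → Option Int → Option Int :=
  fun best entry =>
    match entry with
    | none => best
    | some v =>
      match best with
      | none => some v
      | some b => if (if return_min then v < b else b < v) then some v else some b

theorem pvFold_skip (lst : List (Option Int)) (return_min : Bool) (acc : Option Int) :
    lst.foldl (pvStep return_min) acc
      = (lst.filterMap id).foldl (fun b v => pvStep return_min b (some v)) acc := by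
  induction lst generalizing acc with
  | nil => rfl
  | cons h t ih =>
    cases h with
    | none => simpa [pvStep] using ih acc
    | some v => simpa using ih (pvStep return_min acc (some v))

theorem pvFold_some (t : List Int) (return_min : Bool) (b : Int) :
    t.foldl (fun b v => pvStep return_min b (some v)) (some b)
      = some (t.foldl (fun a v => if return_min then min a v else max a v) b) := by
  induction t generalizing b with
  | nil => rfl
  | cons v t ih =>
    have hstep : pvStep return_min (some b) (some v)
        = some (if return_min then min b v else max b v) := by
      cases return_min <;> simp only [pvStep, min_def, max_def, if_true, if_false, Bool.false_eq_true] <;> split_ifs <;> simp <;> omega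
    simp only [List.foldl]
    rw [hstep, ih]

theorem filterMap_ne_nil (lst : List (Option Int)) (h : ¬ lst.all (fun e => e.isNone) = true) :
    lst.filterMap id ≠ [] := by
  induction lst with
  | nil => simp at h
  | cons x t ih =>
    cases x with
    | none => simp_all
    | some v => simp

-- ===== VERDICT (by name: the statement is the Claim_ definition above) =====
theorem extermum_list_spec : Claim_equal_extermum_list := by
  intro lst return_min _
  unfold Spec_extermum_list extermum_list extermum_list_alt
  rw [show (fun (best entry : Option Int) =>
    match entry with
    | none => best
    | some v =>
      match best with
      | none => some v
      | some b => if (if return_min then v < b else b < v) then some v else some b) = pvStep return_min from rfl]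
  match lst with
  | [] => rfl
  | [x] => cases x <;> rfl
  | x :: y :: t =>
    simp only [List.length_cons, Nat.succ_ne_zero, if_false]
    rw [if_neg (by omega : ¬ t.length + 1 + 1 = 1)]
    by_cases hall : (x :: y :: t).all (fun e => e.isNone) = true
    · rw [if_pos hall]
      rw [pvFold_skip]
      have : (x :: y :: t).filterMap id = [] := by
        rw [List.filterMap_eq_nil_iff]
        intro a ha
        have := List.all_eq_true.mp hall a ha
        cases a <;> simp_all
      rw [this]
      rfl
    · rw [if_neg hall]
      rw [pvFold_skip]
      have hne := filterMap_ne_nil _ hall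
      obtain ⟨v, t', hv⟩ := List.exists_cons_of_ne_nil hne
      rw [hv, List.foldl_cons]
      have hb : pvStep return_min none (some v) = some v := by cases return_min <;> rfl
      rw [hb, pvFold_some]
      cases return_min with
      | true => rw [if_pos rfl, PySem.List.min?_id_cons]; simp
      | false => rw [if_neg (by simp), PySem.List.max?_id_cons]; simp
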